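-- pv_equiv track=rewrite | github.com/SamboPalAccenture/CodeBaseAnalyzer | analyzer.py | clean_flow_output
-- ===== SOURCE A (Python) =====
-- def clean_flow_output(output):
--     cleaned_lines = []
--     seen_start = False
--
--     for line in output.splitlines():
--         # Keep only the first START
--         if line.strip() == '> START':
--             if not seen_start:
--                 cleaned_lines.append(line)
--                 seen_start = True
--             continue
--
--         # Keep other meaningful steps
--         if line.strip() and line.strip() != '> START':
--             cleaned_lines.append(line)
--
--     return "\n".join(cleaned_lines)
-- ===== SOURCE B (Python) =====
-- def clean_flow_output(output):
--     nonempty = [l for l in output.splitlines() if l.strip()]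
--     first_start = next((k for k, l in enumerate(nonempty) if l.strip() == '> START'), None)
--     return "\n".join(l for k, l in enumerate(nonempty)
--                      if l.strip() != '> START' or k == first_start)
-- ===== Notes on version B (the rewrite author's own statement) =====
-- stated objective: alternative
-- what changed: Replaces the stateful single-pass seen_start flag loop with an index-first decomposition: filter out blank lines, precompute the index of the first '> START' line, then keep lines by a stateless predicate over that index.
import Mathlib
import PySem

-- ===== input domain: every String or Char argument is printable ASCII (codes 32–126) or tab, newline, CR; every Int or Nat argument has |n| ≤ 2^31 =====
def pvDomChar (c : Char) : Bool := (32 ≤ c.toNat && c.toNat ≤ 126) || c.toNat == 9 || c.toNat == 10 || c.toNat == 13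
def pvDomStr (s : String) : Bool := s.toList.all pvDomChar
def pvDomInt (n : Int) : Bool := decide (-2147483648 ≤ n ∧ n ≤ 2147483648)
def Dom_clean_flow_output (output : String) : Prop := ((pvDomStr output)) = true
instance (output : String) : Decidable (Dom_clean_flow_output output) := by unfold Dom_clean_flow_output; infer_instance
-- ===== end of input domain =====

-- B replaces A's stateful seen_start flag loop by an index-first decomposition (filter blanks,
-- precompute the first-START index, keep by a stateless predicate); objective: alternative.

-- ===== PORT A =====
-- literal transliteration: foldl over splitlines carrying (cleaned_lines, seen_start)
def clean_flow_output (output : String) : String :=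
  let r := (PySem.Str.splitlines output).foldl
    (fun (st : List String × Bool) line =>
      if PySem.Str.strip line = "> START" then
        (if st.2 = false then (st.1 ++ [line], true) else (st.1, st.2))
      else
        (if PySem.Str.strip line ≠ "" ∧ PySem.Str.strip line ≠ "> START" then
          (st.1 ++ [line], st.2)
        else st)) ([], false)
  PySem.Str.join "\n" r.1

-- ===== PORT B =====
-- literal transliteration of Source B: filter blanks, find the first-START index, filter by index
def clean_flow_output_alt (output : String) : String :=
  let nonempty := (PySem.Str.splitlines output).filter (fun l => PySem.Str.strip l ≠ "")
  let firstStart : Option Int :=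
    ((PySem.List.enumerate nonempty).find? (fun p => PySem.Str.strip p.2 == "> START")).map (·.1)
  PySem.Str.join "\n"
    (((PySem.List.enumerate nonempty).filter
        (fun p => PySem.Str.strip p.2 != "> START" || firstStart == some p.1)).map (·.2))

-- ===== PRECONDITION & SPEC =====
def Spec_clean_flow_output (output : String) (out : String) : Prop := out = clean_flow_output_alt output
instance (output : String) (out : String) : Decidable (Spec_clean_flow_output output out) := by unfold Spec_clean_flow_output; infer_instance

-- ===== CLAIM (what is proved, stated in full; the proofs are below) =====
def Claim_equal_clean_flow_output : Prop := ∀ (output : String), Dom_clean_flow_output output → Spec_clean_flow_output output (clean_flow_output output)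

-- ===== LEMMAS AND PROOFS =====

-- A's loop as a structural recursion on the line list
def loopA : Bool → List String → List String
  | _, [] => []
  | seen, l :: ls =>
    if PySem.Str.strip l = "> START" then
      (if seen then loopA true ls else l :: loopA true ls)
    else if PySem.Str.strip l ≠ "" then l :: loopA seen ls
    else loopA seen ls

-- the foldl in port A computes loopA
theorem foldlA_eq (ls : List String) (acc : List String) (seen : Bool) :
    (ls.foldl (fun (st : List String × Bool) line =>
      if PySem.Str.strip line = "> START" then
        (if st.2 = false then (st.1 ++ [line], true) else (st.1, st.2))
      else
        (if PySem.Str.strip line ≠ "" ∧ PySem.Str.strip line ≠ "> START" then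
          (st.1 ++ [line], st.2)
        else st)) (acc, seen)).1 = acc ++ loopA seen ls := by
  induction ls generalizing acc seen with
  | nil => simp [loopA]
  | cons l ls ih =>
    by_cases hS : PySem.Str.strip l = "> START"
    · cases seen <;> simp [List.foldl, loopA, hS, ih]
    · by_cases hE : PySem.Str.strip l = ""
      · simp [List.foldl, loopA, hE, ih]
      · simp [List.foldl, loopA, hS, hE, ih]

-- loopA skips whitespace-only lines, so it agrees with itself on the filtered list
theorem loopA_filter (ls : List String) (seen : Bool) :
    loopA seen ls = loopA seen (ls.filter (fun l => PySem.Str.strip l ≠ "")) := by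
  induction ls generalizing seen with
  | nil => rfl
  | cons l ls ih =>
    by_cases hE : PySem.Str.strip l = ""
    · simp [loopA, hE, ih]
    · by_cases hS : PySem.Str.strip l = "> START"
      · simp [loopA, hS, List.filter, ih]
      · simp [loopA, hS, hE, List.filter, ih]

-- once seen, A keeps exactly the non-START lines (on a blank-free list)
theorem loopA_true (ls : List String) (h : ∀ l ∈ ls, PySem.Str.strip l ≠ "") :
    loopA true ls = ls.filter (fun l => PySem.Str.strip l ≠ "> START") := by
  induction ls with
  | nil => rfl
  | cons l ls ih =>
    have hE := h l (by simp)
    by_cases hS : PySem.Str.strip l = "> START" <;>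
      simp [loopA, hS, hE, List.filter, ih (fun x hx => h x (by simp [hx]))]

-- an index filter whose target index is below every index present is a plain filter
theorem filter_enum_lt (ls : List String) (s i : Int) (hi : i < s) :
    ((PySem.List.enumerate ls s).filter
        (fun p => PySem.Str.strip p.2 != "> START" || (some i : Option Int) == some p.1)).map (·.2)
      = ls.filter (fun l => PySem.Str.strip l ≠ "> START") := by
  induction ls generalizing s with
  | nil => rfl
  | cons l ls ih =>
    have hne : (i == s) = false := by simp; omega
    have hih := ih (s+1) (by omega)
    simp at hih
    by_cases hS : PySem.Str.strip l = "> START" <;>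
      simp [PySem.List.enumerate_cons, List.filter, hS, hne, hih]

-- main invariant: on a blank-free list, A's flag loop equals B's index-first filter
theorem loopA_eq_idx (ls : List String) (s : Int) (h : ∀ l ∈ ls, PySem.Str.strip l ≠ "") :
    loopA false ls
      = ((PySem.List.enumerate ls s).filter
          (fun p => PySem.Str.strip p.2 != "> START" ||
            ((PySem.List.enumerate ls s).find? (fun q => PySem.Str.strip q.2 == "> START")).map (·.1)
              == some p.1)).map (·.2) := by
  induction ls generalizing s with
  | nil => rfl
  | cons l ls ih =>
    have hE := h l (by simp)
    have htl : ∀ x ∈ ls, PySem.Str.strip x ≠ "" := fun x hx => h x (by simp [hx])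
    by_cases hS : PySem.Str.strip l = "> START"
    · simp only [PySem.List.enumerate_cons, List.find?, List.filter_cons]
      simp only [hS, loopA]
      simp only [beq_self_eq_true, if_pos, Option.map_some]
      rw [loopA_true ls htl]
      have := filter_enum_lt ls (s+1) s (by omega)
      simp only [bne] at this ⊢
      simp at this ⊢
      exact this.symm
    · have hb : (PySem.Str.strip l == "> START") = false := by simp [hS]
      have hih := ih (s+1) htl
      simp only [PySem.List.enumerate_cons, List.find?, List.filter_cons, hb, loopA, hS]
      simp at hih
      simp [hih, hE, hS]

-- ===== VERDICT (by name: the statement is the Claim_ definition above) =====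
theorem clean_flow_output_spec : Claim_equal_clean_flow_output := by
  intro output _
  unfold Spec_clean_flow_output clean_flow_output clean_flow_output_alt
  simp only [foldlA_eq, List.nil_append]
  rw [loopA_filter]
  rw [loopA_eq_idx _ 0 (by
    intro l hl
    simpa using (List.mem_filter.mp hl).2)]
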